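-- pv_equiv track=rewrite | github.com/musicmrman99/treespec | utils.py | get_between
-- ===== SOURCE A (Python) =====
-- def get_between(string: str, start_str: str, end_str: str, matching: bool = False) -> str:
--     if start_str == "":
--         start = 0
--     else:
--         start = string.find(start_str)
--         if start < 0:
--             return None
--         start += 1
--
--     if end_str == "":
--         end = len(string)
--
--     # Include up to matching occurance of end_str
--     elif matching:
--         count = 1
--         current_span = start - 1
--         while count > 0:
--             current_span += 1
--             next_start = string[current_span:].find(start_str)
--             next_end = string[current_span:].find(end_str)
--
--             if next_end == -1:
--                 return None # no matching ends left, so no match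
--
--             # No starts left, next end is before next start, or start_str == end_str
--             if (
--                 next_start == -1
--                 or next_end < next_start
--                 or next_start == next_end
--             ):
--                 # Run to next end
--                 current_span += next_end
--                 count -= 1
--
--             # Next start is before next end
--             else:
--                 # Run to next start
--                 current_span += next_start
--                 count += 1
--
--         end = current_span
--
--     # Include up to first occurance of end_str
--     else:
--         end = string[start:].find(end_str)
--         if end < 0:
--             return None
--         end += start
--
--     return string[start:end]
-- ===== SOURCE B (Python) =====
-- def get_between(string, start_str, end_str, matching=False):
--     # Recursive-descent matcher: each nested group is matched by a recursive
--     # call and skipped whole, instead of A's iterative scan with a nesting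
--     # counter over repeatedly sliced copies of the string.
--     if start_str == "":
--         start = 0
--     else:
--         i = string.find(start_str)
--         if i < 0:
--             return None
--         start = i + 1
--     if end_str == "":
--         return string[start:]
--     if matching:
--         end = _match_end(string, start_str, end_str, start)
--     else:
--         end = string.find(end_str, start)
--     if end < 0:
--         return None
--     return string[start:end]
--
-- def _match_end(s, ss, es, p):
--     """Index of the end marker that closes one open group, searching from p;
--     a nested group (next start before next end) is matched recursively and
--     skipped whole, then the search resumes after it.  -1 if unclosed."""
--     while True:
--         e = s.find(es, p)
--         if e < 0:
--             return -1
--         st = s.find(ss, p)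
--         if st < 0 or e <= st:
--             return e
--         inner = _match_end(s, ss, es, st + 1)
--         if inner < 0:
--             return -1
--         p = inner + 1
-- ===== Notes on version B (the rewrite author's own statement) =====
-- stated objective: alternative
-- what changed: Replaces A's iterative scan that maintains a nesting counter over repeatedly sliced copies of the string with a recursive-descent matcher: a helper finds the end of one group, matching each nested group by a recursive call and skipping it whole, using str.find(sub, pos) so no substring copies are made.
import Mathlib
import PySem

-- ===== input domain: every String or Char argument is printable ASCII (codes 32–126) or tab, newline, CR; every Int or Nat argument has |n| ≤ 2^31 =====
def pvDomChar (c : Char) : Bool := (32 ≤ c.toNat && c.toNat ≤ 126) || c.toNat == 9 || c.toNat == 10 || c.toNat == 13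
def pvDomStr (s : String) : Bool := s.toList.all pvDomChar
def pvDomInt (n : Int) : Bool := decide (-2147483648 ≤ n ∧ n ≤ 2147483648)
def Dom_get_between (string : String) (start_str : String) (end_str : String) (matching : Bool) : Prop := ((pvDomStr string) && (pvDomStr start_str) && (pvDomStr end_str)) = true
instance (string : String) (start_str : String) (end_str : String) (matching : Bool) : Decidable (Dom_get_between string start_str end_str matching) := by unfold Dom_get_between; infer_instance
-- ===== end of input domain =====

-- B replaces A's iterative nesting-counter scan over sliced copies with a
-- recursive-descent matcher (each nested group matched by a recursive call and
-- skipped whole); an alternative algorithm, no speed claim.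

-- ===== PORT A =====
-- A's while loop, transliterated: `string[current_span:].find(...)` on both
-- markers, a nesting counter, and the same branch order.  The loop is ported
-- with fuel s.length + 2: current_span strictly increases each iteration, so
-- the fuel is never exhausted on any reachable call (the proof below shows
-- this; it is not assumed).
def getBetweenLoopA (s ss es : List Char) : Nat → Int → Int → Option Int
  | fuel, count, cs =>
    if count > 0 then
      match fuel with
      | 0 => none
      | fuel + 1 =>
        let cs1 := cs + 1
        let next_start := PySem.Chars.find (PySem.List.slice s (some cs1) none) ss
        let next_end := PySem.Chars.find (PySem.List.slice s (some cs1) none) es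
        if next_end = -1 then none
        else if next_start = -1 ∨ next_end < next_start ∨ next_start = next_end then
          getBetweenLoopA s ss es fuel (count - 1) (cs1 + next_end)
        else
          getBetweenLoopA s ss es fuel (count + 1) (cs1 + next_start)
    else some cs

def get_between (string : String) (start_str : String) (end_str : String) (matching : Bool) : Option String :=
  let s := string.toList
  let ss := start_str.toList
  let es := end_str.toList
  let startOpt : Option Int :=
    if start_str = "" then some 0
    else
      let start := PySem.Chars.find s ss
      if start < 0 then none else some (start + 1)
  match startOpt with
  | none => none
  | some start =>
    if end_str = "" then
      some (String.ofList (PySem.List.slice s (some start) (some (s.length : Int))))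
    else if matching then
      (getBetweenLoopA s ss es (s.length + 2) 1 (start - 1)).map
        (fun e => String.ofList (PySem.List.slice s (some start) (some e)))
    else
      let e := PySem.Chars.find (PySem.List.slice s (some start) none) es
      if e < 0 then none
      else some (String.ofList (PySem.List.slice s (some start) (some (e + start))))

-- ===== PORT B =====
-- hand port of Python's s.find(sub, p) for a Nat position p: a match of
-- s.find(sub, p) lies wholly inside s[p:], so it is p + find of the tail
-- (exact for 0 ≤ p, the only way B calls it).
def findFrom (s sub : List Char) (p : Nat) : Int :=
  let r := PySem.Chars.find (s.drop p) sub
  if r = -1 then -1 else (p : Int) + r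

-- B's `_match_end`: the while-loop continue (`p = inner + 1`) is the tail
-- recursive call; fuel s.length + 2 suffices since the position strictly
-- increases (proved below, not assumed).  `none` is Python's -1.
def matchEnd (s ss es : List Char) : Nat → Nat → Option Nat
  | 0, _ => none
  | fuel + 1, p =>
    let e := findFrom s es p
    if e < 0 then none
    else
      let st := findFrom s ss p
      if st < 0 ∨ e ≤ st then some e.toNat
      else
        match matchEnd s ss es fuel (st.toNat + 1) with
        | none => none
        | some inner => matchEnd s ss es fuel (inner + 1)

def get_between_alt (string : String) (start_str : String) (end_str : String) (matching : Bool) : Option String :=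
  let s := string.toList
  let ss := start_str.toList
  let es := end_str.toList
  let startOpt : Option Nat :=
    if start_str = "" then some 0
    else
      let i := PySem.Chars.find s ss
      if i < 0 then none else some (i.toNat + 1)
  match startOpt with
  | none => none
  | some start =>
    if end_str = "" then some (String.ofList (s.drop start))
    else
      let endOpt : Option Nat :=
        if matching then matchEnd s ss es (s.length + 2) start
        else
          let e := findFrom s es start
          if e < 0 then none else some e.toNat
      match endOpt with
      | none => none
      | some e => some (String.ofList ((s.drop start).take (e - start)))

-- ===== PRECONDITION & SPEC =====
def Spec_get_between (string : String) (start_str : String) (end_str : String) (matching : Bool) (out : Option String) : Prop := out = get_between_alt string start_str end_str matching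
instance (string : String) (start_str : String) (end_str : String) (matching : Bool) (out : Option String) : Decidable (Spec_get_between string start_str end_str matching out) := by unfold Spec_get_between; infer_instance

-- ===== CLAIM (what is proved, stated in full; the proofs are below) =====
def Claim_equal_get_between : Prop := ∀ (string : String) (start_str : String) (end_str : String) (matching : Bool), Dom_get_between string start_str end_str matching → Spec_get_between string start_str end_str matching (get_between string start_str end_str matching)

-- ===== LEMMAS AND PROOFS =====

-- proof-side chaining of B's matcher: what A's counter value c means in terms
-- of B's one-group matcher (c pending groups = c chained matchEnd calls).
def chainB (s ss es : List Char) : Nat → Nat → Option Nat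
  | 0, _ => none
  | 1, p => matchEnd s ss es (s.length + 2) p
  | c + 2, p => (matchEnd s ss es (s.length + 2) p).bind (fun q => chainB s ss es (c + 1) (q + 1))

theorem find_nil_of_ne (sub : List Char) (h : sub ≠ []) : PySem.Chars.find ([] : List Char) sub = -1 := by
  rw [PySem.Chars.find_eq_neg_one_iff]
  simpa [List.infix_nil] using h

theorem findFrom_neg (s sub : List Char) (p : Nat) (hsub : sub ≠ []) (hp : s.length ≤ p) :
    findFrom s sub p = -1 := by
  unfold findFrom
  rw [List.drop_eq_nil_iff.mpr (by omega), find_nil_of_ne sub hsub]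
  simp

theorem findFrom_cases (s sub : List Char) (p : Nat) :
    findFrom s sub p = -1 ∨ (p : Int) ≤ findFrom s sub p := by
  unfold findFrom
  by_cases h : PySem.Chars.find (s.drop p) sub = -1
  · simp [h]
  · right
    have h0 := PySem.Chars.neg_one_le_find (s.drop p) sub
    simp only [h, if_false]
    omega

theorem matchEnd_ge (s ss es : List Char) :
    ∀ (f p q : Nat), matchEnd s ss es f p = some q → p ≤ q := by
  intro f
  induction f with
  | zero => intro p q h; simp [matchEnd] at h
  | succ f ih =>
    intro p q h
    rw [matchEnd] at h
    by_cases he : findFrom s es p < 0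
    · simp [he] at h
    · simp only [he, if_false] at h
      by_cases hc : findFrom s ss p < 0 ∨ findFrom s es p ≤ findFrom s ss p
      · simp only [hc, if_true, Option.some.injEq] at h
        rcases findFrom_cases s es p with h1 | h1
        · omega
        · omega
      · simp only [hc, if_false] at h
        rcases hst : matchEnd s ss es f (((findFrom s ss p).toNat) + 1) with _ | inner
        · rw [hst] at h; simp at h
        · rw [hst] at h
          have h1 := ih _ _ hst
          have h2 := ih _ _ h
          push_neg at hc
          rcases findFrom_cases s ss p with h3 | h3
          · omega
          · omega

theorem matchEnd_succ (s ss es : List Char) (hes : es ≠ []) :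
    ∀ (f p : Nat), s.length + 1 ≤ f + p →
    matchEnd s ss es (f + 1) p = matchEnd s ss es f p := by
  intro f
  induction f with
  | zero =>
    intro p hp
    rw [matchEnd, matchEnd]
    rw [findFrom_neg s es p hes (by omega)]
    simp
  | succ f ih =>
    intro p hp
    rw [matchEnd, matchEnd]
    by_cases he : findFrom s es p < 0
    · simp [he]
    · simp only [he, if_false]
      by_cases hc : findFrom s ss p < 0 ∨ findFrom s es p ≤ findFrom s ss p
      · simp [hc]
      · simp only [hc, if_false]
        push_neg at hc
        have hst0 : (p : Int) ≤ findFrom s ss p := by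
          rcases findFrom_cases s ss p with h1 | h1
          · omega
          · omega
        have hrw : matchEnd s ss es (f + 1) ((findFrom s ss p).toNat + 1)
            = matchEnd s ss es f ((findFrom s ss p).toNat + 1) := ih _ (by omega)
        rw [hrw]
        rcases hst : matchEnd s ss es f (((findFrom s ss p).toNat) + 1) with _ | inner
        · rfl
        · have hinner := matchEnd_ge s ss es _ _ _ hst
          exact ih (inner + 1) (by omega)

theorem matchEnd_add (s ss es : List Char) (hes : es ≠ []) :
    ∀ (k f p : Nat), s.length + 1 ≤ f + p →
    matchEnd s ss es (f + k) p = matchEnd s ss es f p := by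
  intro k
  induction k with
  | zero => intro f p _; rfl
  | succ k ih =>
    intro f p hp
    rw [show f + (k + 1) = (f + k) + 1 by omega, matchEnd_succ s ss es hes (f + k) p (by omega)]
    exact ih f p hp

-- matchEnd with the standard fuel, restated from any position (fuel is always adequate)
theorem matchEnd_std (s ss es : List Char) (hes : es ≠ []) (f p : Nat)
    (hf : s.length + 1 ≤ f + p) :
    matchEnd s ss es (s.length + 2) p = matchEnd s ss es f p := by
  rcases le_total f (s.length + 2) with h | h
  · rw [show s.length + 2 = f + (s.length + 2 - f) by omega, matchEnd_add s ss es hes _ f p hf]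
  · rw [show f = (s.length + 2) + (f - (s.length + 2)) by omega,
      matchEnd_add s ss es hes _ (s.length + 2) p (by omega)]

theorem chainB_none (s ss es : List Char) (c p : Nat) (hc : 1 ≤ c)
    (h : matchEnd s ss es (s.length + 2) p = none) : chainB s ss es c p = none := by
  match c with
  | 1 => simpa [chainB] using h
  | c + 2 => simp [chainB, h]

theorem chainB_some (s ss es : List Char) (c p q : Nat)
    (h : matchEnd s ss es (s.length + 2) p = some q) :
    chainB s ss es (c + 1) p = if c = 0 then some q else chainB s ss es c (q + 1) := by
  match c with
  | 0 => simpa [chainB] using h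
  | c + 1 => simp [chainB, h]

-- the start branch: one more pending group = recurse into the nested group
theorem chainB_shift (s ss es : List Char) (hes : es ≠ []) (c p : Nat) (hc : 1 ≤ c)
    (he : ¬ findFrom s es p < 0) (hst : ¬ (findFrom s ss p < 0 ∨ findFrom s es p ≤ findFrom s ss p)) :
    chainB s ss es c p = chainB s ss es (c + 1) ((findFrom s ss p).toNat + 1) := by
  have hst0 : (p : Int) ≤ findFrom s ss p := by
    push_neg at hst
    rcases findFrom_cases s ss p with h1 | h1
    · omega
    · omega
  have hunf : matchEnd s ss es (s.length + 2) p
      = (matchEnd s ss es (s.length + 2) ((findFrom s ss p).toNat + 1)).bind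
          (fun inner => matchEnd s ss es (s.length + 2) (inner + 1)) := by
    conv_lhs => rw [show s.length + 2 = (s.length + 1) + 1 by omega, matchEnd]
    simp only [he, if_false, hst, if_false]
    rw [← matchEnd_std s ss es hes (s.length + 1) _ (by omega)]
    rcases hin : matchEnd s ss es (s.length + 2) (((findFrom s ss p).toNat) + 1) with _ | inner
    · rfl
    · have hge := matchEnd_ge s ss es _ _ _ hin
      simp only [Option.bind_some]
      exact (matchEnd_std s ss es hes (s.length + 1) _ (by omega)).symm
  match c with
  | 1 =>
    show matchEnd s ss es (s.length + 2) p = _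
    rw [hunf]
    rcases hin : matchEnd s ss es (s.length + 2) (((findFrom s ss p).toNat) + 1) with _ | inner
    · simp [chainB, hin]
    · simp [chainB, hin]
  | c + 2 =>
    show (matchEnd s ss es (s.length + 2) p).bind _ = _
    rw [hunf]
    rcases hin : matchEnd s ss es (s.length + 2) (((findFrom s ss p).toNat) + 1) with _ | inner
    · simp [chainB, hin]
    · simp only [Option.bind_some, chainB, hin]

theorem loopA_stop (s ss es : List Char) (fuel : Nat) (cs : Int) :
    getBetweenLoopA s ss es fuel 0 cs = some cs := by
  rw [getBetweenLoopA.eq_def]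
  simp

-- the main bridge: A's fuel/counter loop equals B's chained matcher
theorem loopA_eq_chain (s ss es : List Char) (hes : es ≠ []) :
    ∀ (fuel : Nat) (count : Int) (p : Nat), s.length + 2 ≤ fuel + p → 1 ≤ count →
    getBetweenLoopA s ss es fuel count ((p : Int) - 1)
      = (chainB s ss es count.toNat p).map (Nat.cast : Nat → Int) := by
  intro fuel
  induction fuel with
  | zero =>
    intro count p hf hc
    rw [getBetweenLoopA]
    have hnone : matchEnd s ss es (s.length + 2) p = none := by
      rw [matchEnd_std s ss es hes 1 p (by omega), matchEnd]
      rw [findFrom_neg s es p hes (by omega)]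
      simp
    rw [chainB_none s ss es count.toNat p (by omega) hnone]
    simp [show (0:Int) < count by omega]
  | succ fuel ih =>
    intro count p hf hc
    rw [getBetweenLoopA]
    simp only [show ((p : Int) - 1 + 1) = (p : Int) by ring, PySem.List.slice_from_natCast,
      show ((0:Int) < count) = True by simp; omega, if_true]
    obtain ⟨ne, hne⟩ : ∃ x, PySem.Chars.find (s.drop p) es = x := ⟨_, rfl⟩
    obtain ⟨ns, hns⟩ : ∃ x, PySem.Chars.find (s.drop p) ss = x := ⟨_, rfl⟩
    rw [hne, hns]
    have hne1 : -1 ≤ ne := hne ▸ PySem.Chars.neg_one_le_find (s.drop p) es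
    have hns1 : -1 ≤ ns := hns ▸ PySem.Chars.neg_one_le_find (s.drop p) ss
    have hneL : ne ≤ ((s.drop p).length : Int) := hne ▸ PySem.Chars.find_le_length (s.drop p) es
    have hdl : (s.drop p).length = s.length - p := by simp
    rw [hdl] at hneL
    have hfe : findFrom s es p = if ne = -1 then -1 else (p : Int) + ne := by
      simp only [findFrom, hne]
    have hfs : findFrom s ss p = if ns = -1 then -1 else (p : Int) + ns := by
      simp only [findFrom, hns]
    by_cases hEnil : ne = -1
    · have hnone : matchEnd s ss es (s.length + 2) p = none := by
        rw [show s.length + 2 = (s.length + 1) + 1 by omega, matchEnd]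
        simp [hfe, hEnil]
      rw [chainB_none s ss es count.toNat p (by omega) hnone]
      simp [hEnil]
    · rw [if_neg hEnil]
      have hne0 : 0 ≤ ne := by omega
      have hhe : ¬ findFrom s es p < 0 := by rw [hfe, if_neg hEnil]; omega
      by_cases hbr : ns = -1 ∨ ne < ns ∨ ns = ne
      · -- end branch
        have hcond : findFrom s ss p < 0 ∨ findFrom s es p ≤ findFrom s ss p := by
          rw [hfe, hfs, if_neg hEnil]
          rcases hbr with h | h | h
          · left; rw [if_pos h]; omega
          · by_cases hNs : ns = -1
            · left; rw [if_pos hNs]; omega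
            · right; rw [if_neg hNs]; omega
          · right; rw [if_neg (show ¬ ns = -1 by omega)]; omega
        have hsome : matchEnd s ss es (s.length + 2) p = some ((p : Int) + ne).toNat := by
          rw [show s.length + 2 = (s.length + 1) + 1 by omega, matchEnd]
          simp only [hhe, if_false, hcond, if_true]
          congr 1
          rw [hfe, if_neg hEnil]
        rw [if_pos hbr]
        have hcn : count.toNat = (count.toNat - 1) + 1 := by omega
        rw [hcn, chainB_some s ss es (count.toNat - 1) p _ hsome]
        by_cases h1 : count = 1
        · rw [if_pos (by omega), h1]
          rw [show (1 : Int) - 1 = 0 by ring, loopA_stop]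
          simp only [Option.map_some, Option.some.injEq]
          omega
        · rw [if_neg (by omega)]
          have hpe : (p : Int) + ne = ((((p : Int) + ne).toNat + 1 : Nat) : Int) - 1 := by
            push_cast; omega
          conv_lhs => rw [hpe]
          rw [ih (count - 1) (((p : Int) + ne).toNat + 1) (by omega) (by omega),
            show (count - 1).toNat = count.toNat - 1 by omega]
      · -- start branch
        have hb : ns ≠ -1 ∧ ¬ ne < ns ∧ ns ≠ ne := by
          refine ⟨?_, ?_, ?_⟩ <;> (intro h; exact hbr (by omega))
        obtain ⟨hb1, hb2, hb3⟩ := hb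
        have hcond : ¬ (findFrom s ss p < 0 ∨ findFrom s es p ≤ findFrom s ss p) := by
          rw [hfe, hfs, if_neg hEnil, if_neg hb1]
          omega
        rw [if_neg hbr]
        have hst0 : 0 ≤ ns := by omega
        have hfs' : (findFrom s ss p).toNat = p + ns.toNat := by
          rw [hfs, if_neg hb1]
          omega
        have hps : (p : Int) + ns = (((p + ns.toNat + 1 : Nat)) : Int) - 1 := by push_cast; omega
        rw [hps, ih (count + 1) (p + ns.toNat + 1) (by omega) (by omega),
          show (count + 1).toNat = count.toNat + 1 by omega,
          chainB_shift s ss es hes count.toNat p (by omega) hhe hcond, hfs']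

theorem slice_natCast_take (s : List Char) (a b : Nat) :
    PySem.List.slice s (some (a : Int)) (some (b : Int)) = (s.drop a).take (b - a) :=
  PySem.List.slice_natCast s a b

-- the part of both ports after `start` is known (A uses (st : Int), B uses st : Nat)
theorem tail_eq (string end_str : String) (ss : List Char) (matching : Bool) (st : Nat)
    (hes : end_str ≠ "" → end_str.toList ≠ []) :
    (if end_str = "" then
      some (String.ofList (PySem.List.slice string.toList (some ((st : Nat) : Int)) (some (string.toList.length : Int))))
    else if matching then
      (getBetweenLoopA string.toList ss end_str.toList (string.toList.length + 2) 1 (((st : Nat) : Int) - 1)).map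
        (fun e => String.ofList (PySem.List.slice string.toList (some ((st : Nat) : Int)) (some e)))
    else
      let e := PySem.Chars.find (PySem.List.slice string.toList (some ((st : Nat) : Int)) none) end_str.toList
      if e < 0 then none
      else some (String.ofList (PySem.List.slice string.toList (some ((st : Nat) : Int)) (some (e + (st : Nat))))))
    =
    (if end_str = "" then some (String.ofList (string.toList.drop st))
    else
      match
        (if matching then matchEnd string.toList ss end_str.toList (string.toList.length + 2) st
         else
           let e := findFrom string.toList end_str.toList st
           if e < 0 then none else some e.toNat) with
      | none => none
      | some e => some (String.ofList ((string.toList.drop st).take (e - st)))) := by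
  set s := string.toList with hsdef
  by_cases he : end_str = ""
  · simp only [he, if_true]
    congr 1
    rw [slice_natCast_take]
    congr 1
    exact List.take_of_length_le (by simp)
  · have hes' : end_str.toList ≠ [] := hes he
    rw [if_neg he, if_neg he]
    by_cases hm : matching
    · rw [if_pos hm]
      simp only [hm, if_true]
      rw [loopA_eq_chain s ss end_str.toList hes' (s.length + 2) 1 st (by omega) le_rfl]
      rcases hq : matchEnd s ss end_str.toList (s.length + 2) st with _ | q
      · simp [Int.toNat_one, chainB, hq]
      · have hge := matchEnd_ge s ss end_str.toList _ _ _ hq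
        simp only [Int.toNat_one, chainB, hq, Option.map_some]
        rw [slice_natCast_take]
    · rw [if_neg hm]
      simp only [hm, Bool.false_eq_true, if_false]
      simp only [PySem.List.slice_from_natCast]
      set e := PySem.Chars.find (s.drop st) end_str.toList with hedef
      have hfe : findFrom s end_str.toList st = if e = -1 then -1 else (st : Int) + e := rfl
      by_cases hneg : e = -1
      · simp [hneg, hfe]
      · have he0 : 0 ≤ e := by
          have := PySem.Chars.neg_one_le_find (s.drop st) end_str.toList
          omega
        rw [if_neg (show ¬ e < 0 by omega), hfe, if_neg hneg]
        rw [if_neg (show ¬ (st : Int) + e < 0 by omega)]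
        simp only
        congr 1
        rw [show e + (st : Int) = ((st + e.toNat : Nat) : Int) by push_cast; omega]
        rw [slice_natCast_take,
          show st + e.toNat - st = ((st : Int) + e).toNat - st by omega]

-- ===== VERDICT (by name: the statement is the Claim_ definition above) =====
theorem get_between_spec : Claim_equal_get_between := by
  unfold Claim_equal_get_between Spec_get_between
  intro string start_str end_str matching _
  unfold get_between get_between_alt
  have hes : end_str ≠ "" → end_str.toList ≠ [] :=
    fun h hc => h (String.toList_eq_nil_iff.mp hc)
  by_cases hss : start_str = ""
  · have h := tail_eq string end_str start_str.toList matching 0 hes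
    simp only [Nat.cast_zero] at h
    simpa [hss] using h
  · simp only [hss, if_false]
    set f := PySem.Chars.find string.toList start_str.toList with hfdef
    by_cases hneg : f < 0
    · simp [hneg]
    · rw [if_neg hneg, if_neg hneg]
      simp only
      rw [show f + 1 = (((f.toNat + 1 : Nat)) : Int) by push_cast; omega]
      exact tail_eq string end_str start_str.toList matching (f.toNat + 1) hes
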